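-- pv_equiv track=rewrite | github.com/pypi-data/pypi-mirror-100 | packages/gingko/gingko-0.1.1.tar.gz/gingko-0.1.1/gingko/dataframes.py | reindex
-- ===== SOURCE A (Python) =====
-- def reindex(idxs_list, sparse=False):
--     n_depth = len(idxs_list[0])
--     out_idxs = []
--     _idx = [0]*n_depth
--     for j, idx in enumerate(idxs_list):
--         if j>0:
--             for i in range(n_depth):
--                 if i<n_depth-1 and idx[i+1:]!=idxs_list[j-1][i+1:]:
--                     if sparse:
--                         _idx[i] = 0
--                     else:
--                         _idx[i] +=1
--                 elif idx[i]!=idxs_list[j-1][i]: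
--                     _idx[i] +=1
--         out_idxs.append(tuple(_idx))
--     return out_idxs
-- ===== SOURCE B (Python) =====
-- def reindex(idxs_list, sparse=False):
--     # Walk each row's levels deepest-first, carrying one flag that records
--     # whether the row differs from the previous row anywhere deeper than the
--     # current level; that replaces a suffix comparison per level by O(1)
--     # bookkeeping.
--     d = len(idxs_list[0])
--     out = []
--     cur = [0] * d
--     prev = None
--     for idx in idxs_list:
--         if prev is not None:
--             deeper = idx[d:] != prev[d:]
--             for i in range(d - 1, -1, -1):
--                 if i < d - 1 and deeper:
--                     cur[i] = 0 if sparse else cur[i] + 1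
--                 elif idx[i] != prev[i]:
--                     cur[i] += 1
--                 deeper = deeper or idx[i] != prev[i]
--         out.append(tuple(cur))
--         prev = idx
--     return out
-- ===== Notes on version B (the rewrite author's own statement) =====
-- stated objective: faster
-- what changed: Instead of comparing a whole suffix slice of the row against the previous row at every depth, B walks the levels of each adjacent row pair deepest-first carrying a single 'rows differ deeper than here' flag, turning the per-level suffix comparison into O(1) bookkeeping; Pre_ excludes only inputs where A raises IndexError (the empty list, or a row after the first shorter than the first row).
import Mathlib
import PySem

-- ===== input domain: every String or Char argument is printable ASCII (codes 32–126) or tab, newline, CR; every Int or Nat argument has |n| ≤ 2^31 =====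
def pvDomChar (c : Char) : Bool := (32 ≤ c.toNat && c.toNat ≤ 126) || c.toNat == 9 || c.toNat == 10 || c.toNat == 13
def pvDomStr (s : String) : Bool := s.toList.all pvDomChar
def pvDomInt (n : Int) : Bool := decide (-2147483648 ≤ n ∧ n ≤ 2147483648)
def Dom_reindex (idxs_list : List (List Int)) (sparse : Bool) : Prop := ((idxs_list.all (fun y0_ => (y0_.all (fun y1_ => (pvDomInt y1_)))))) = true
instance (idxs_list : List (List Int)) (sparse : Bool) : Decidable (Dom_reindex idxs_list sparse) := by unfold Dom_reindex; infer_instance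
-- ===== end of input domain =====

-- B replaces A's per-depth suffix-slice comparisons by a deepest-first level walk
-- carrying one 'rows differ deeper than here' flag (objective: a faster algorithm).

-- ===== PORT A =====
-- inner 'for i in range(n_depth)' loop of A, mutating _idx (= c)
def reindexInnerA (idx prev : List Int) (d : Nat) (sparse : Bool) (cur : List Int) : List Int :=
  (List.range d).foldl (fun c i =>
    if i < d - 1 ∧ PySem.List.slice idx (some ((i : Int) + 1)) none ≠ PySem.List.slice prev (some ((i : Int) + 1)) none then
      (if sparse then c.set i 0 else c.set i (c.getD i 0 + 1))
    else if PySem.List.pyGet? idx (i : Int) ≠ PySem.List.pyGet? prev (i : Int) then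
      c.set i (c.getD i 0 + 1)
    else c) cur

-- one iteration of A's 'for j, idx in enumerate(idxs_list)' loop
def reindexBodyA (idxs_list : List (List Int)) (d : Nat) (sparse : Bool)
    (s : List Int × List (List Int)) (ji : Int × List Int) : List Int × List (List Int) :=
  let cur := if 0 < ji.1 then
      reindexInnerA ji.2 ((PySem.List.pyGet? idxs_list (ji.1 - 1)).getD []) d sparse s.1
    else s.1
  (cur, s.2 ++ [cur])

def reindex (idxs_list : List (List Int)) (sparse : Bool) : List (List Int) :=
  let d := (idxs_list.headI).length   -- len(idxs_list[0]); Pre_ excludes the empty list (IndexError)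
  ((PySem.List.enumerate idxs_list).foldl (reindexBodyA idxs_list d sparse) (List.replicate d 0, [])).2


-- ===== PORT B =====
-- one level of B's backward walk; state = (cur, deeper); the trailing
-- 'deeper = deeper or idx[i] != prev[i]' is the second component
def reindexLvlB (idx prev : List Int) (d : Nat) (sparse : Bool)
    (s : List Int × Bool) (i : Nat) : List Int × Bool :=
  ((if i < d - 1 ∧ s.2 = true then
      (if sparse then s.1.set i 0 else s.1.set i (s.1.getD i 0 + 1))
    else if PySem.List.pyGet? idx (i : Int) ≠ PySem.List.pyGet? prev (i : Int) then
      s.1.set i (s.1.getD i 0 + 1)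
    else s.1),
   s.2 || decide (PySem.List.pyGet? idx (i : Int) ≠ PySem.List.pyGet? prev (i : Int)))

-- B's 'if prev is not None:' block: seed 'deeper = idx[d:] != prev[d:]',
-- then 'for i in range(d-1,-1,-1)' = the levels d-1,…,0
def reindexStepB (idx prev : List Int) (d : Nat) (sparse : Bool) (cur : List Int) : List Int :=
  ((List.range d).reverse.foldl (reindexLvlB idx prev d sparse)
    (cur, decide (PySem.List.slice idx (some (d : Int)) none ≠ PySem.List.slice prev (some (d : Int)) none))).1

-- one iteration of B's 'for idx in idxs_list' loop; state = (cur, out, prev)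
def reindexBodyB (d : Nat) (sparse : Bool)
    (s : List Int × List (List Int) × Option (List Int)) (idx : List Int) :
    List Int × List (List Int) × Option (List Int) :=
  let cur := match s.2.2 with
    | some prev => reindexStepB idx prev d sparse s.1
    | none => s.1
  (cur, s.2.1 ++ [cur], some idx)

def reindex_alt (idxs_list : List (List Int)) (sparse : Bool) : List (List Int) :=
  let d := (idxs_list.headI).length
  (idxs_list.foldl (reindexBodyB d sparse) (List.replicate d 0, ([], none))).2.1

-- ===== PRECONDITION & SPEC =====
-- Pre_ is exactly A's return domain: on the empty list A raises IndexError on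
-- idxs_list[0], and whenever some row after the first is shorter than the first
-- row A's element access idx[n_depth-1] raises IndexError on that pair.
def Pre_reindex (idxs_list : List (List Int)) (sparse : Bool) : Prop :=
  idxs_list ≠ [] ∧ ∀ l ∈ idxs_list, (idxs_list.headI).length ≤ l.length
instance (idxs_list : List (List Int)) (sparse : Bool) : Decidable (Pre_reindex idxs_list sparse) := by unfold Pre_reindex; infer_instance

def pvWitness_reindex : List (List Int) × Bool := ([[0, 1], [0, 2], [1, 2]], false)

def Spec_reindex (idxs_list : List (List Int)) (sparse : Bool) (out : List (List Int)) : Prop := out = reindex_alt idxs_list sparse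
instance (idxs_list : List (List Int)) (sparse : Bool) (out : List (List Int)) : Decidable (Spec_reindex idxs_list sparse out) := by unfold Spec_reindex; infer_instance

-- ===== CLAIM (what is proved, stated in full; the proofs are below) =====
def Claim_equal_reindex : Prop := ∀ (idxs_list : List (List Int)) (sparse : Bool), Dom_reindex idxs_list sparse → Pre_reindex idxs_list sparse → Spec_reindex idxs_list sparse (reindex idxs_list sparse)

-- ===== LEMMAS AND PROOFS =====

-- the elementwise update 'c[i] = g(i, c[i])'
def pvUpd (g : Nat → Int → Int) (acc : List Int) (i : Nat) : List Int := acc.set i (g i (acc.getD i 0))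

theorem pvSet_getD_self (acc : List Int) (i : Nat) : acc.set i (acc.getD i 0) = acc := by
  by_cases h : i < acc.length
  · rw [List.getD_eq_getElem?_getD, List.getElem?_eq_getElem h, Option.getD_some,
      List.set_getElem_self]
  · exact List.set_eq_of_length_le (by omega)

theorem pvFold_length (g : Nat → Int → Int) (n : Nat) (acc : List Int) :
    ((List.range n).foldl (pvUpd g) acc).length = acc.length := by
  induction n with
  | zero => simp
  | succ n ih => simp [List.range_succ, pvUpd, ih]

theorem pvFold_getElem? (g : Nat → Int → Int) (n : Nat) (acc : List Int) (k : Nat) :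
    ((List.range n).foldl (pvUpd g) acc)[k]? = if k < n then (acc[k]?).map (g k) else acc[k]? := by
  induction n generalizing k with
  | zero => simp
  | succ n ih =>
    rw [List.range_succ, List.foldl_append]
    simp only [List.foldl_cons, List.foldl_nil, pvUpd]
    rw [List.getElem?_set]
    by_cases hk : n = k
    · subst hk
      rw [pvFold_length, List.getD_eq_getElem?_getD, ih]
      simp only [lt_irrefl, if_false, if_pos (Nat.lt_succ_self n)]
      cases h : acc[n]? with
      | none =>
        have hnl : ¬ n < acc.length := by
          intro hlt; exact absurd (List.getElem?_eq_getElem hlt) (by simp [h])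
        simp [hnl, h]
      | some v =>
        have hnl : n < acc.length := by
          by_contra hlt
          rw [List.getElem?_eq_none (by omega)] at h; simp at h
        simp [hnl, h]
    · rw [if_neg hk, ih]
      by_cases h1 : k < n
      · simp [h1, Nat.lt_succ_of_lt h1]
      · have h2 : ¬ k < n + 1 := by omega
        simp [h1, h2]

theorem pvFoldRev_getElem? (g : Nat → Int → Int) (n : Nat) (acc : List Int) (k : Nat) :
    ((List.range n).reverse.foldl (pvUpd g) acc)[k]? = if k < n then (acc[k]?).map (g k) else acc[k]? := by
  induction n generalizing acc with
  | zero => simp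
  | succ n ih =>
    have hr : (List.range (n + 1)).reverse = n :: (List.range n).reverse := by
      rw [List.range_succ]; simp
    rw [hr, List.foldl_cons, ih]
    have hset : (pvUpd g acc n)[k]? = if n = k then (acc[k]?).map (g k) else acc[k]? := by
      simp only [pvUpd]
      rw [List.getElem?_set, List.getD_eq_getElem?_getD]
      by_cases hk : n = k
      · subst hk
        cases h : acc[n]? with
        | none =>
          have hnl : ¬ n < acc.length := by
            intro hlt; exact absurd (List.getElem?_eq_getElem hlt) (by simp [h])
          simp [hnl]
        | some v =>
          have hnl : n < acc.length := by
            by_contra hlt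
            rw [List.getElem?_eq_none (by omega)] at h; simp at h
          simp [hnl, h]
      · rw [if_neg hk, if_neg hk]
    by_cases h1 : k < n
    · rw [if_pos h1, if_pos (by omega), hset, if_neg (by omega)]
    · rw [if_neg h1, hset]
      by_cases h2 : n = k
      · subst h2; rw [if_pos rfl, if_pos (by omega)]
      · rw [if_neg h2, if_neg (by omega)]

-- the two traversal orders produce the same list (each index is touched once)
theorem pvFold_rev_eq_fwd (g : Nat → Int → Int) (n : Nat) (acc : List Int) :
    (List.range n).reverse.foldl (pvUpd g) acc = (List.range n).foldl (pvUpd g) acc := by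
  apply List.ext_getElem?
  intro k
  rw [pvFoldRev_getElem?, pvFold_getElem?]

-- foldl congruence under an invariant
theorem pvFoldl_congr_inv {α : Type} (P : List Int → Prop) (l : List α)
    (f g : List Int → α → List Int) (acc : List Int) (hacc : P acc)
    (h : ∀ cc a, a ∈ l → P cc → f cc a = g cc a)
    (hg : ∀ cc a, P cc → P (g cc a)) : l.foldl f acc = l.foldl g acc := by
  induction l generalizing acc with
  | nil => rfl
  | cons x xs ih =>
    simp only [List.foldl_cons]
    rw [h acc x (by simp) hacc]
    exact ih (g acc x) (hg acc x hacc) (fun cc a ha hp => h cc a (by simp [ha]) hp)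

-- the per-depth update both loops perform, as a pure function of (i, old value)
def pvGAd (idx prev : List Int) (d : Nat) (sparse : Bool) (i : Nat) (v : Int) : Int :=
  if i < d - 1 ∧ idx.drop (i + 1) ≠ prev.drop (i + 1) then (if sparse then 0 else v + 1)
  else if idx[i]? ≠ prev[i]? then v + 1 else v

-- the slice in A's condition is the drop
theorem pvSliceFrom (xs : List Int) (i : Nat) :
    PySem.List.slice xs (some ((i : Int) + 1)) none = xs.drop (i + 1) := by
  have hcast : ((i : Int) + 1) = ((i + 1 : Nat) : Int) := by push_cast; ring
  rw [hcast, PySem.List.slice_from_natCast]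

theorem reindexInnerA_eq_fold (idx prev : List Int) (d : Nat) (sparse : Bool) (cur : List Int) :
    reindexInnerA idx prev d sparse cur = (List.range d).foldl (pvUpd (pvGAd idx prev d sparse)) cur := by
  unfold reindexInnerA
  refine pvFoldl_congr_inv (fun _ => True) _ _ _ cur trivial ?_ (fun _ _ _ => trivial)
  intro cc a _ _
  simp only [pvUpd, pvGAd, pvSliceFrom, PySem.List.pyGet?_natCast]
  split_ifs <;> try rfl
  rw [pvSet_getD_self]

-- one level of B's walk equals the shared update, and the carried flag stays
-- the statement 'the rows differ at this level or deeper'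
theorem pvLvlB_eq (idx prev : List Int) (d : Nat) (sparse : Bool) (cur : List Int) (j : Nat)
    (hji : j < idx.length) (hjp : j < prev.length) :
    reindexLvlB idx prev d sparse (cur, decide (idx.drop (j + 1) ≠ prev.drop (j + 1))) j
      = (pvUpd (pvGAd idx prev d sparse) cur j, decide (idx.drop j ≠ prev.drop j)) := by
  have hdropj : (idx.drop j ≠ prev.drop j) ↔ (idx[j]? ≠ prev[j]? ∨ idx.drop (j + 1) ≠ prev.drop (j + 1)) := by
    rw [List.drop_eq_getElem_cons hji, List.drop_eq_getElem_cons hjp,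
      List.getElem?_eq_getElem hji, List.getElem?_eq_getElem hjp]
    simp only [List.cons.injEq, Option.some.injEq, ne_eq]
    tauto
  unfold reindexLvlB
  refine Prod.ext ?_ ?_
  · simp only [pvUpd, pvGAd, PySem.List.pyGet?_natCast, decide_eq_true_eq]
    by_cases h1 : j < d - 1 ∧ idx.drop (j + 1) ≠ prev.drop (j + 1)
    · rw [if_pos h1, if_pos h1]
      cases sparse <;> simp
    · rw [if_neg h1, if_neg h1]
      by_cases h2 : idx[j]? ≠ prev[j]?
      · rw [if_pos h2, if_pos h2]
      · rw [if_neg h2, if_neg h2, pvSet_getD_self]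
  · simp only [PySem.List.pyGet?_natCast]
    by_cases h1 : idx.drop (j + 1) ≠ prev.drop (j + 1) <;>
      by_cases h2 : idx[j]? ≠ prev[j]? <;>
        simp [h1, h2, hdropj]

-- B's backward walk computes the same elementwise updates (backwards)
theorem pvBfold (idx prev : List Int) (d : Nat) (sparse : Bool)
    (hi : d ≤ idx.length) (hp : d ≤ prev.length) :
    ∀ (j : Nat), j ≤ d → ∀ cur : List Int,
      ((List.range j).reverse.foldl (reindexLvlB idx prev d sparse)
          (cur, decide (idx.drop j ≠ prev.drop j))).1
        = (List.range j).reverse.foldl (pvUpd (pvGAd idx prev d sparse)) cur := by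
  intro j
  induction j with
  | zero => intro _ cur; simp
  | succ j ih =>
    intro hjd cur
    have hr : (List.range (j + 1)).reverse = j :: (List.range j).reverse := by
      rw [List.range_succ]; simp
    rw [hr, List.foldl_cons, List.foldl_cons,
      pvLvlB_eq idx prev d sparse cur j (by omega) (by omega)]
    exact ih (by omega) (pvUpd (pvGAd idx prev d sparse) cur j)

theorem pvStepB_as_fold (idx prev : List Int) (d : Nat) (sparse : Bool) (cur : List Int)
    (hi : d ≤ idx.length) (hp : d ≤ prev.length) :
    reindexStepB idx prev d sparse cur = (List.range d).foldl (pvUpd (pvGAd idx prev d sparse)) cur := by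
  unfold reindexStepB
  rw [show (d : Int) = ((d : Nat) : Int) from rfl, PySem.List.slice_from_natCast,
    PySem.List.slice_from_natCast, pvBfold idx prev d sparse hi hp d le_rfl cur,
    pvFold_rev_eq_fwd]

-- the heart: A's inner loop equals B's step on rows at least d deep
theorem pvStep_eq (idx prev : List Int) (d : Nat) (sparse : Bool) (cur : List Int)
    (hi : d ≤ idx.length) (hp : d ≤ prev.length) :
    reindexInnerA idx prev d sparse cur = reindexStepB idx prev d sparse cur := by
  rw [reindexInnerA_eq_fold, pvStepB_as_fold idx prev d sparse cur hi hp]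

theorem reindexStepB_length (idx prev : List Int) (d : Nat) (sparse : Bool) (cur : List Int)
    (hi : d ≤ idx.length) (hp : d ≤ prev.length) :
    (reindexStepB idx prev d sparse cur).length = cur.length := by
  rw [pvStepB_as_fold idx prev d sparse cur hi hp, pvFold_length]

-- the two outer loops in lock-step: A reads idxs_list[j-1], B carries the previous row
theorem pvOuter_eq (idxs_list : List (List Int)) (d : Nat) (sparse : Bool)
    (hlen : ∀ l ∈ idxs_list, d ≤ l.length) :
    ∀ (rest pre : List (List Int)) (prevv cur : List Int) (out : List (List Int)),
      pre ++ rest = idxs_list → pre.getLast? = some prevv → cur.length = d →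
      ((PySem.List.enumerate rest ((pre.length : Int))).foldl (reindexBodyA idxs_list d sparse) (cur, out)).2
        = (rest.foldl (reindexBodyB d sparse) (cur, (out, some prevv))).2.1 := by
  intro rest
  induction rest with
  | nil => intro pre prevv cur out _ _ _; simp [PySem.List.enumerate]
  | cons x rest ih =>
    intro pre prevv cur out hsplit hlast hc
    have hpre : pre ≠ [] := by
      intro h; subst h; simp at hlast
    have hposlen : 1 ≤ pre.length := by
      cases pre with
      | nil => exact absurd rfl hpre
      | cons _ _ => simp
    rw [PySem.List.enumerate_cons]
    simp only [List.foldl_cons]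
    -- the A-side step reads exactly the carried previous row
    have hidxprev : (PySem.List.pyGet? idxs_list ((pre.length : Int) - 1)).getD [] = prevv := by
      have hcast : ((pre.length : Int) - 1) = ((pre.length - 1 : Nat) : Int) := by
        push_cast [hposlen]; ring
      rw [hcast, PySem.List.pyGet?_natCast, ← hsplit,
        List.getElem?_append_left (by omega), ← List.getLast?_eq_getElem?, hlast]
      rfl
    have hxlen : d ≤ x.length := hlen x (by rw [← hsplit]; simp)
    have hplen : d ≤ prevv.length := by
      have hmem : prevv ∈ pre := List.mem_of_getLast? hlast
      exact hlen prevv (by rw [← hsplit]; exact List.mem_append_left _ hmem)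
    have hstepA : reindexBodyA idxs_list d sparse (cur, out) ((pre.length : Int), x)
        = (reindexStepB x prevv d sparse cur, out ++ [reindexStepB x prevv d sparse cur]) := by
      unfold reindexBodyA
      have hpos' : (0 : Int) < ((pre.length : Int), x).1 := by
        simp only []
        exact_mod_cast hposlen
      rw [if_pos hpos']
      simp only []
      rw [hidxprev, pvStep_eq x prevv d sparse cur hxlen hplen]
    have hstepB : reindexBodyB d sparse (cur, (out, some prevv)) x
        = (reindexStepB x prevv d sparse cur, (out ++ [reindexStepB x prevv d sparse cur], some x)) := rfl
    rw [hstepA, hstepB]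
    have hlen1 : ((pre ++ [x]).length : Int) = (pre.length : Int) + 1 := by
      push_cast [List.length_append, List.length_cons, List.length_nil]; omega
    rw [← hlen1]
    refine ih (pre ++ [x]) x _ _ (by rw [List.append_assoc]; exact hsplit)
      List.getLast?_concat ?_
    rw [reindexStepB_length x prevv d sparse cur hxlen hplen]; exact hc

-- ===== VERDICT (by name: the statement is the Claim_ definition above) =====
theorem reindex_spec : Claim_equal_reindex := by
  intro idxs_list sparse _ hpre
  obtain ⟨hne, hlen⟩ := hpre
  unfold Spec_reindex reindex reindex_alt
  cases idxs_list with
  | nil => exact absurd rfl hne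
  | cons h t =>
    simp only [List.headI]
    rw [PySem.List.enumerate]
    simp only [List.foldl_cons]
    have hA0 : reindexBodyA (h :: t) h.length sparse (List.replicate h.length 0, []) (0, h)
        = (List.replicate h.length 0, [List.replicate h.length 0]) := by
      unfold reindexBodyA; norm_num
    have hB0 : reindexBodyB h.length sparse (List.replicate h.length 0, ([], none)) h
        = (List.replicate h.length 0, ([List.replicate h.length 0], some h)) := rfl
    rw [hA0, hB0]
    have hmain := pvOuter_eq (h :: t) h.length sparse
      (fun l hl => by simpa using hlen l hl) t [h] h
      (List.replicate h.length 0) [List.replicate h.length 0] rfl rfl (by simp)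
    simpa using hmain
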